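-- pv_equiv track=rewrite | github.com/Jeong-zju/corl | data/process_dataset.py | collect_chunk_file_indices
-- ===== SOURCE A (Python) =====
-- from typing import Any, Iterator, Sequence
--
-- def collect_chunk_file_indices(
--     source_episodes_meta: Sequence[dict[str, Any]],
-- ) -> dict[int, list[int]]:
--     chunk_to_file_indices: dict[int, set[int]] = {}
--     for episode_meta in source_episodes_meta:
--         chunk_index = int(episode_meta["data/chunk_index"])
--         file_index = int(episode_meta["data/file_index"])
--         chunk_to_file_indices.setdefault(chunk_index, set()).add(file_index)
--     return {
--         chunk_index: sorted(file_indices)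
--         for chunk_index, file_indices in chunk_to_file_indices.items()
--     }
-- ===== SOURCE B (Python) =====
-- def collect_chunk_file_indices(source_episodes_meta):
--     pairs = [
--         (int(m["data/chunk_index"]), int(m["data/file_index"]))
--         for m in source_episodes_meta
--     ]
--     result = {}
--     for chunk_index in dict.fromkeys(c for c, _ in pairs):
--         files = sorted(f for c, f in pairs if c == chunk_index)
--         deduped = []
--         for f in files:
--             if not deduped or deduped[-1] != f:
--                 deduped.append(f)
--         result[chunk_index] = deduped
--     return result
-- ===== Notes on version B (the rewrite author's own statement) =====
-- stated objective: alternative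
-- what changed: Replaces the dict-of-sets accumulation plus per-group sorted(set) by a flat (chunk,file) pair list: chunk keys are ordered-deduped once, and each group's value is built by a sort of the filtered files followed by a single adjacent-dedup scan, with no set data structure at all.
import Mathlib
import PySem

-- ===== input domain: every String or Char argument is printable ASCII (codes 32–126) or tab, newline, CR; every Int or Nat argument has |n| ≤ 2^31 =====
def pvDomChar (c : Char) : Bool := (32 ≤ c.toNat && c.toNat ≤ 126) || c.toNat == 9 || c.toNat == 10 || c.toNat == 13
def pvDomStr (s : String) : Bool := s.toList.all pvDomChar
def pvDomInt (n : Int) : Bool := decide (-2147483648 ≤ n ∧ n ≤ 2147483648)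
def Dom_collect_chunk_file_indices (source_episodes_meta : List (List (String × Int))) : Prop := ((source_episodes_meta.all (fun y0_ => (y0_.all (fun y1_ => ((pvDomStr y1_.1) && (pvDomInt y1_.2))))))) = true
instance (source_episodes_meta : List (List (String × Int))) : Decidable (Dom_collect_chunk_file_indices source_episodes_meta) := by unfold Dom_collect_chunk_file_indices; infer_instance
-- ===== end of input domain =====

-- B replaces A's dict-of-sets accumulation by a flat pair list with ordered key dedup and a
-- per-chunk filter + sort + adjacent-dedup scan (objective: alternative, not faster).

-- ===== PORT A =====
-- Port of A: builds a dict chunk -> set of file indices (setdefault(..).add is Dict.modify with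
-- an empty-set default), then maps sorted over the items. The match skips an episode whose
-- lookup fails — in Python that is a KeyError, excluded by Pre_ below.
def collect_chunk_file_indices (source_episodes_meta : List (List (String × Int))) : List (Int × List Int) :=
  let d : PySem.Dict Int (PySem.Set Int) :=
    source_episodes_meta.foldl (fun d m =>
      match (PySem.Dict.mk m).get? "data/chunk_index", (PySem.Dict.mk m).get? "data/file_index" with
      | some c, some f => d.modify c PySem.Set.empty (fun s => PySem.Set.add s f)
      | _, _ => d) PySem.Dict.empty
  d.items.map (fun p => (p.1, PySem.List.sorted p.2 (fun x => x) false))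

-- ===== PORT B =====
-- 'if not deduped or deduped[-1] != f: deduped.append(f)'; deduped[-1] on a nonempty list is getLast?.
def pvAppendIfNew (g : List Int) (f : Int) : List Int :=
  if g = [] ∨ g.getLast? ≠ some f then g ++ [f] else g

-- Port of B (Source B): flat pair list (lookup with a default in place of Source B's KeyError, excluded
-- by Pre_), ordered key dedup (dict.fromkeys = PySem.List.dedup), per-chunk filter + sort +
-- adjacent-dedup fold.
def collect_chunk_file_indices_alt (source_episodes_meta : List (List (String × Int))) : List (Int × List Int) :=
  let pairs : List (Int × Int) := source_episodes_meta.map (fun m =>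
    ((PySem.Dict.mk m).getD "data/chunk_index" 0, (PySem.Dict.mk m).getD "data/file_index" 0))
  (PySem.List.dedup (pairs.map (fun p => p.1))).map (fun c =>
    let fs := PySem.List.sorted ((pairs.filter (fun p => p.1 == c)).map (fun p => p.2)) (fun x => x) false
    (c, fs.foldl pvAppendIfNew []))

-- ===== PRECONDITION & SPEC =====
-- Pre_ excludes exactly the episodes missing one of the two keys, on which Python A raises KeyError.
def Pre_collect_chunk_file_indices (source_episodes_meta : List (List (String × Int))) : Prop :=
  ∀ m ∈ source_episodes_meta,
    ((PySem.Dict.mk m).get? "data/chunk_index").isSome = true ∧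
    ((PySem.Dict.mk m).get? "data/file_index").isSome = true
instance (source_episodes_meta : List (List (String × Int))) : Decidable (Pre_collect_chunk_file_indices source_episodes_meta) := by unfold Pre_collect_chunk_file_indices; infer_instance

def pvWitness_collect_chunk_file_indices : (List (List (String × Int))) :=
  [[("data/chunk_index", 2), ("data/file_index", 5)],
   [("data/chunk_index", 0), ("data/file_index", 3)],
   [("data/chunk_index", 2), ("data/file_index", 5)]]

def Spec_collect_chunk_file_indices (source_episodes_meta : List (List (String × Int))) (out : List (Int × List Int)) : Prop := out = collect_chunk_file_indices_alt source_episodes_meta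
instance (source_episodes_meta : List (List (String × Int))) (out : List (Int × List Int)) : Decidable (Spec_collect_chunk_file_indices source_episodes_meta out) := by unfold Spec_collect_chunk_file_indices; infer_instance

-- ===== CLAIM (what is proved, stated in full; the proofs are below) =====
def Claim_equal_collect_chunk_file_indices : Prop := ∀ (source_episodes_meta : List (List (String × Int))), Dom_collect_chunk_file_indices source_episodes_meta → Pre_collect_chunk_file_indices source_episodes_meta → Spec_collect_chunk_file_indices source_episodes_meta (collect_chunk_file_indices source_episodes_meta)

-- ===== LEMMAS AND PROOFS =====

-- chunk / file lookup with default (what both ports compute under Pre_)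
def pvCOf (m : List (String × Int)) : Int := (PySem.Dict.mk m).getD "data/chunk_index" 0
def pvFOf (m : List (String × Int)) : Int := (PySem.Dict.mk m).getD "data/file_index" 0

-- in a Pairwise (<) list, the last element is maximal
theorem pv_le_getLast (l : List Int) (h : l.Pairwise (· < ·)) :
    ∀ a ∈ l, ∀ b, l.getLast? = some b → a ≤ b := by
  induction l with
  | nil => simp
  | cons x t ih =>
    intro a ha b hb
    cases t with
    | nil =>
      simp at ha hb; omega
    | cons y u =>
      rw [List.getLast?_cons_cons] at hb
      rcases List.mem_cons.mp ha with rfl | hat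
      · have hxb : a < b := (List.pairwise_cons.mp h).1 b (List.mem_of_getLast? hb)
        omega
      · exact ih (List.pairwise_cons.mp h).2 a hat b hb

-- the adjacent-dedup fold of B: strictly increasing output with the same members
theorem pv_adj (fs : List Int) : ∀ acc : List Int, fs.Pairwise (· ≤ ·) →
    acc.Pairwise (· < ·) → (∀ a ∈ acc, ∀ f ∈ fs, a ≤ f) →
    (fs.foldl pvAppendIfNew acc).Pairwise (· < ·) ∧
    (∀ x, x ∈ fs.foldl pvAppendIfNew acc ↔ x ∈ acc ∨ x ∈ fs) := by
  induction fs with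
  | nil => intro acc _ hacc _; exact ⟨hacc, by simp⟩
  | cons v fs ih =>
    intro acc hfs hacc hle
    have hhead : ∀ g ∈ fs, v ≤ g := (List.pairwise_cons.mp hfs).1
    have hmem : ∀ x, x ∈ pvAppendIfNew acc v ↔ x ∈ acc ∨ x = v := by
      intro x
      unfold pvAppendIfNew
      split
      · simp
      · rename_i hcond
        have hlast : acc.getLast? = some v := by
          by_contra hh; exact hcond (Or.inr hh)
        constructor
        · exact Or.inl
        · rintro (hx | rfl)
          · exact hx
          · exact List.mem_of_getLast? hlast
    have hpw : (pvAppendIfNew acc v).Pairwise (· < ·) := by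
      unfold pvAppendIfNew
      split
      · rename_i hcond
        rcases hcond with rfl | hlast
        · simp only [List.nil_append]; exact List.pairwise_singleton _ _
        · rw [List.pairwise_append]
          refine ⟨hacc, by simp, ?_⟩
          intro a ha b hb
          simp at hb; subst hb
          cases hL : acc.getLast? with
          | none =>
            exact absurd (List.getLast?_eq_none_iff.mp hL) (List.ne_nil_of_mem ha)
          | some L =>
            have haL : a ≤ L := pv_le_getLast acc hacc a ha L hL
            have hLv : L ≤ b := hle L (List.mem_of_getLast? hL) b (List.mem_cons_self)
            have : L ≠ b := by intro h; exact hlast (by rw [hL, h])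
            omega
      · exact hacc
    have hle' : ∀ a ∈ pvAppendIfNew acc v, ∀ g ∈ fs, a ≤ g := by
      intro a ha g hg
      rcases (hmem a).mp ha with haacc | rfl
      · exact hle a haacc g (List.mem_cons_of_mem _ hg)
      · exact hhead g hg
    obtain ⟨hp, hm⟩ := ih (pvAppendIfNew acc v) (List.pairwise_cons.mp hfs).2 hpw hle'
    refine ⟨by simpa [List.foldl_cons] using hp, ?_⟩
    intro x
    rw [List.foldl_cons, hm x, hmem x]
    simp; tauto

-- sorting the set of l's elements = adjacent-dedup of the sorted l
theorem pv_sorted_set (l : List Int) :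
    PySem.List.sorted (PySem.Set.ofList l) (fun x => x) false
    = (PySem.List.sorted l (fun x => x) false).foldl pvAppendIfNew [] := by
  have hs : (PySem.List.sorted l (fun x => x) false).Pairwise (· ≤ ·) :=
    PySem.List.sorted_pairwise l (fun x => x)
  obtain ⟨hp, hm⟩ := pv_adj (PySem.List.sorted l (fun x => x) false) [] hs (by simp) (by simp)
  apply PySem.List.sorted_eq_of_perm_of_pairwise_lt
  · rw [List.perm_ext_iff_of_nodup (hp.imp ne_of_lt) (PySem.Set.nodup_ofList l)]
    intro a
    rw [hm a, PySem.Set.mem_ofList]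
    simp [(PySem.List.sorted_perm l (fun x => x) false).mem_iff]
  · exact hp

-- A's accumulated set for chunk c, as a fold of Set.add over the filtered file indices
theorem pv_getD_fold (metaxs : List (List (String × Int))) :
    ∀ (d : PySem.Dict Int (PySem.Set Int)) (c : Int),
    (metaxs.foldl (fun d m => d.modify (pvCOf m) PySem.Set.empty
        (fun s => PySem.Set.add s (pvFOf m))) d).getD c PySem.Set.empty
    = ((metaxs.filter (fun m => pvCOf m == c)).map pvFOf).foldl PySem.Set.add
        (d.getD c PySem.Set.empty) := by
  induction metaxs with
  | nil => intro d c; simp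
  | cons m metaxs ih =>
    intro d c
    rw [List.foldl_cons, ih]
    by_cases h : pvCOf m = c
    · simp [h, List.foldl_cons]
    · have h' : c ≠ pvCOf m := fun hh => h hh.symm
      simp [h, h', PySem.Dict.getD_modify, beq_iff_eq]

-- ===== VERDICT (by name: the statement is the Claim_ definition above) =====
theorem collect_chunk_file_indices_spec : Claim_equal_collect_chunk_file_indices := by
  intro metaxs _ hpre
  unfold Spec_collect_chunk_file_indices collect_chunk_file_indices collect_chunk_file_indices_alt
  dsimp only
  -- under Pre_, A's step is the modify with pvCOf/pvFOf
  have hstep : metaxs.foldl (fun d m =>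
      match (PySem.Dict.mk m).get? "data/chunk_index", (PySem.Dict.mk m).get? "data/file_index" with
      | some c, some f => d.modify c PySem.Set.empty (fun s => PySem.Set.add s f)
      | _, _ => d) PySem.Dict.empty
      = metaxs.foldl (fun d m => d.modify (pvCOf m) PySem.Set.empty
          (fun s => PySem.Set.add s (pvFOf m))) PySem.Dict.empty := by
    apply PySem.List.foldl_congr_mem
    intro d m hmem
    obtain ⟨hc, hf⟩ := hpre m hmem
    obtain ⟨c, hc⟩ := Option.isSome_iff_exists.mp hc
    obtain ⟨f, hf⟩ := Option.isSome_iff_exists.mp hf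
    rw [hc, hf]
    have e1 : pvCOf m = c := PySem.Dict.getD_of_get?_eq_some _ 0 hc
    have e2 : pvFOf m = f := PySem.Dict.getD_of_get?_eq_some _ 0 hf
    rw [e1, e2]
  rw [hstep]
  set D := metaxs.foldl (fun d m => d.modify (pvCOf m) PySem.Set.empty
      (fun s => PySem.Set.add s (pvFOf m))) PySem.Dict.empty with hD
  -- keys of A's dict = ordered dedup of the chunk indices
  have hkeys : D.keys = PySem.Set.ofList (metaxs.map pvCOf) := by
    rw [hD, PySem.Dict.keys_foldl_modify_key metaxs pvCOf PySem.Set.empty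
      (fun _ m => fun s => PySem.Set.add s (pvFOf m)) PySem.Dict.empty]
    rw [PySem.Dict.keys_empty]
    rfl
  have hnodup : D.keys.Nodup := by rw [hkeys]; exact PySem.Set.nodup_ofList _
  rw [PySem.Dict.items_eq_map_keys D hnodup PySem.Set.empty, hkeys]
  simp only [List.map_map]
  -- B's deduped key list is the same list of distinct chunk indices
  have hded : PySem.List.dedup (List.map ((fun p => p.1) ∘ fun m =>
      ((PySem.Dict.mk m).getD "data/chunk_index" 0, (PySem.Dict.mk m).getD "data/file_index" 0))
      metaxs) = PySem.Set.ofList (metaxs.map pvCOf) := rfl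
  rw [hded]
  apply List.map_congr_left
  intro c _
  dsimp only [Function.comp]
  rw [hD, pv_getD_fold metaxs PySem.Dict.empty c, PySem.Dict.getD_empty]
  rw [List.filter_map, List.map_map]
  exact congrArg (fun t => (c, t))
    (by rw [show List.foldl PySem.Set.add PySem.Set.empty
              ((metaxs.filter (fun m => pvCOf m == c)).map pvFOf)
            = PySem.Set.ofList ((metaxs.filter (fun m => pvCOf m == c)).map pvFOf) from rfl]
        exact pv_sorted_set _)
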